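-- pv_equiv track=rewrite | github.com/zazabap/problem-reductions | docs/paper/verify-reductions/verify_minimum_dominating_set_minimum_sum_multicenter.py | check_extraction
-- ===== SOURCE A (Python) =====
-- from collections import deque
-- from itertools import combinations
-- from typing import Optional
--
-- def extract_solution(config: list[int]) -> list[int]:
--     """
--     Extract a DominatingSet solution from a MinSumMulticenter solution.
--
--     Since the graph is preserved identically and the configuration space
--     is the same (binary indicator per vertex), the configuration maps
--     directly: the set of centers IS the dominating set.
--     """
--     return list(config)
--
-- def is_dominating_set(adj: list[set[int]], config: list[int]) -> bool:
--     """Check whether config (binary indicator) selects a dominating set."""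
--     n = len(adj)
--     for v in range(n):
--         if config[v] == 1:
--             continue
--         if not any(config[u] == 1 for u in adj[v]):
--             return False
--     return True
--
-- def shortest_distances_from_centers(
--     adj: list[set[int]], config: list[int]
-- ) -> Optional[list[int]]:
--     """
--     BFS multi-source shortest distances from all centers (config[v]=1).
--     Returns list of distances, or None if any vertex is unreachable.
--     """
--     n = len(adj)
--     dist = [-1] * n
--     queue = deque()
--     for v in range(n):
--         if config[v] == 1:
--             dist[v] = 0
--             queue.append(v)
--     while queue:
--         u = queue.popleft()
--         for w in adj[u]:
--             if dist[w] == -1: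
--                 dist[w] = dist[u] + 1
--                 queue.append(w)
--     if any(d == -1 for d in dist):
--         return None
--     return dist
--
-- def total_weighted_distance(adj: list[set[int]], config: list[int]) -> Optional[int]:
--     """Compute sum of distances from all vertices to nearest center (unit weights)."""
--     distances = shortest_distances_from_centers(adj, config)
--     if distances is None:
--         return None
--     return sum(distances)
--
-- def is_feasible_pmedian(
--     adj: list[set[int]], config: list[int], k: int, B: int
-- ) -> bool:
--     """Check whether config is a feasible MinSumMulticenter solution."""
--     num_selected = sum(config)
--     if num_selected != k:
--         return False
--     total = total_weighted_distance(adj, config)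
--     if total is None:
--         return False
--     return total <= B
--
-- def check_extraction(adj: list[set[int]], edges: list[tuple[int, int]], k: int) -> int:
--     """Extraction -- extract source solution from every feasible target witness.
--     Returns the number of extraction checks performed."""
--     n = len(adj)
--     B = n - k
--     checks = 0
--     for chosen in combinations(range(n), k):
--         config = [0] * n
--         for v in chosen:
--             config[v] = 1
--         if is_feasible_pmedian(adj, config, k, B):
--             extracted = extract_solution(config)
--             assert is_dominating_set(adj, extracted), (
--                 f"Extraction failed: n={n}, edges={edges}, k={k}, config={config}"
--             )
--             checks += 1
--     return checks
-- ===== SOURCE B (Python) =====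
-- from itertools import combinations
--
-- def check_extraction(adj, edges, k):
--     """Count feasible size-k multicenter configs by a direct local coverage
--     test (every vertex is a center or an out-neighbour of a center) instead
--     of multi-source BFS distance summation."""
--     n = len(adj)
--     checks = 0
--     for chosen in combinations(range(n), k):
--         covered = [False] * n
--         for u in chosen:
--             covered[u] = True
--             for w in adj[u]:
--                 covered[w] = True
--         if all(covered):
--             checks += 1
--     return checks
-- ===== Notes on version B (the rewrite author's own statement) =====
-- stated objective: simpler
-- what changed: Per subset, A runs a multi-source BFS and checks the summed shortest distances against n-k; B drops the BFS entirely and just marks each center and its out-neighbours, counting subsets that cover every vertex (feasible iff every vertex is a center or an out-neighbour of one).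
import Mathlib
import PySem

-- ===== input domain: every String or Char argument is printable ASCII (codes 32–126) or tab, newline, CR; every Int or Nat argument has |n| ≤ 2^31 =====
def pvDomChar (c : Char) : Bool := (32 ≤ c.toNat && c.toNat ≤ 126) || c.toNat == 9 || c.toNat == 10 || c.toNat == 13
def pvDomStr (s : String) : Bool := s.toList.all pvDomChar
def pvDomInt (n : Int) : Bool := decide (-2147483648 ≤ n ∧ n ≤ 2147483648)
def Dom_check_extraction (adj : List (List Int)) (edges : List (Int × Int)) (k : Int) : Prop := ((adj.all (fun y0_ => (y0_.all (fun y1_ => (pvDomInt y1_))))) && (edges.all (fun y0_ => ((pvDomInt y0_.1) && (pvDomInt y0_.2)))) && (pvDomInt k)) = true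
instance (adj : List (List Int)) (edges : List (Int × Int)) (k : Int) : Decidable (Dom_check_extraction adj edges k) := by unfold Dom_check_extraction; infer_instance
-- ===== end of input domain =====

-- B replaces A's multi-source BFS + distance-sum feasibility test by a direct local
-- coverage check (every vertex is a center or an out-neighbour of a center); same counts.

-- ===== PORT A =====

-- Python index wraparound: exact for -n ≤ i < n (the range Pre_ admits)
def pvWrap (n : Nat) (i : Int) : Nat := (if i < 0 then i + n else i).toNat

-- itertools.combinations(l, j) in Python's lexicographic order (shared library helper)
def pvCombos : List Nat → Nat → List (List Nat)
  | _, 0 => [[]]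
  | [], _+1 => []
  | x :: xs, j+1 => ((pvCombos xs j).map (fun s => x :: s)) ++ pvCombos xs (j+1)

-- dist[i] read / write with Python's negative-index wraparound
def pvDget (d : List Int) (i : Int) : Int := d.getD (pvWrap d.length i) 0
def pvDset (d : List Int) (i : Int) (x : Int) : List Int := d.set (pvWrap d.length i) x

-- body of A's `while queue` iteration: scan adj[u], discover unvisited neighbours
def pvBfsStep (adj : List (List Int)) (u : Int) (dq : List Int × List Int) : List Int × List Int :=
  (adj.getD (pvWrap adj.length u) []).foldl
    (fun p w => if pvDget p.1 w = -1 then (pvDset p.1 w (pvDget p.1 u + 1), p.2 ++ [w]) else p) dq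

-- A's `while queue` loop; fuel n + Σ row lengths + 1 always exceeds the number of
-- iterations (≤ n initial queue entries plus at most one append per scanned neighbour)
def pvBfsLoop (adj : List (List Int)) : Nat → List Int → List Int → List Int
  | 0, d, _ => d
  | _+1, d, [] => d
  | fuel+1, d, u :: rest =>
    let s := pvBfsStep adj u (d, rest)
    pvBfsLoop adj fuel s.1 s.2

def pvShortestDistances (adj : List (List Int)) (config : List Int) : Option (List Int) :=
  let n := adj.length
  let init := (List.range n).foldl
    (fun (p : List Int × List Int) v =>
      if config.getD v 0 = 1 then (p.1.set v 0, p.2 ++ [(v : Int)]) else p)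
    (List.replicate n (-1), [])
  let dist := pvBfsLoop adj (n + (adj.map List.length).sum + 1) init.1 init.2
  if dist.any (fun x => x = -1) then none else some dist

def pvTotalWeightedDistance (adj : List (List Int)) (config : List Int) : Option Int :=
  match pvShortestDistances adj config with
  | none => none
  | some ds => some ds.sum

def pvIsFeasible (adj : List (List Int)) (config : List Int) (k B : Int) : Bool :=
  if config.sum ≠ k then false
  else match pvTotalWeightedDistance adj config with
    | none => false
    | some t => decide (t ≤ B)

-- A's assert is skipped: inside Pre_ it never fails (Pre_'s last clause excludes exactly
-- the inputs on which it would raise AssertionError), so it does not affect the count.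
def check_extraction (adj : List (List Int)) (edges : List (Int × Int)) (k : Int) : Int :=
  let n := adj.length
  let B : Int := (n : Int) - k
  (pvCombos (List.range n) k.toNat).foldl
    (fun checks chosen =>
      let config := chosen.foldl (fun c v => c.set v 1) (List.replicate n (0 : Int))
      if pvIsFeasible adj config k B then checks + 1 else checks) 0

-- ===== PORT B =====

def check_extraction_alt (adj : List (List Int)) (edges : List (Int × Int)) (k : Int) : Int :=
  let n := adj.length
  (pvCombos (List.range n) k.toNat).foldl
    (fun checks chosen =>
      let covered := chosen.foldl
        (fun c u => (adj.getD u []).foldl (fun c2 w => c2.set (pvWrap n w) true) (c.set u true))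
        (List.replicate n false)
      if covered.all (fun b => b) then checks + 1 else checks) 0

-- ===== PRECONDITION & SPEC =====

-- every adjacency entry is a valid Python index into a length-n list
def pvInRange (adj : List (List Int)) : Prop :=
  ∀ row ∈ adj, ∀ w ∈ row, -(adj.length : Int) ≤ w ∧ w < (adj.length : Int)

-- s out-covers every vertex (each vertex is in s or an out-neighbour of a member of s)
def pvCoversAll (adj : List (List Int)) (s : List Nat) : Prop :=
  ∀ v < adj.length, v ∈ s ∨ ∃ u ∈ s, ∃ w ∈ adj.getD u [], pvWrap adj.length w = v

-- s in-dominates every vertex (A's assert: each vertex is in s or has an out-edge INTO s)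
def pvInDominatesAll (adj : List (List Int)) (s : List Nat) : Prop :=
  ∀ v < adj.length, v ∈ s ∨ ∃ w ∈ adj.getD v [], pvWrap adj.length w ∈ s

-- Pre_ excludes exactly the inputs where A raises: k < 0 (ValueError from combinations);
-- an out-of-range adjacency entry when 1 ≤ k ≤ n, i.e. when the enumeration touches the
-- rows (IndexError; for k = 0 or k > n no row is read and A returns, such inputs stay in);
-- and, on in-range adjacency, a size-k subset that out-covers all vertices (= feasible)
-- but does not in-dominate them, on which A's assert raises AssertionError.
def Pre_check_extraction (adj : List (List Int)) (edges : List (Int × Int)) (k : Int) : Prop :=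
  0 ≤ k ∧ (1 ≤ k → k ≤ (adj.length : Int) → pvInRange adj) ∧
  (pvInRange adj → ∀ s ∈ (List.range adj.length).sublists,
     s.length = k.toNat → pvCoversAll adj s → pvInDominatesAll adj s)

instance (adj : List (List Int)) (edges : List (Int × Int)) (k : Int) : Decidable (Pre_check_extraction adj edges k) := by
  unfold Pre_check_extraction pvInRange pvCoversAll pvInDominatesAll; infer_instance

def pvWitness_check_extraction : List (List Int) × (List (Int × Int)) × Int :=
  ([[1], [0]], [(0, 1)], 1)

def Spec_check_extraction (adj : List (List Int)) (edges : List (Int × Int)) (k : Int) (out : Int) : Prop := out = check_extraction_alt adj edges k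
instance (adj : List (List Int)) (edges : List (Int × Int)) (k : Int) (out : Int) : Decidable (Spec_check_extraction adj edges k out) := by unfold Spec_check_extraction; infer_instance

-- ===== CLAIM (what is proved, stated in full; the proofs are below) =====
def Claim_equal_check_extraction : Prop := ∀ (adj : List (List Int)) (edges : List (Int × Int)) (k : Int), Dom_check_extraction adj edges k → Pre_check_extraction adj edges k → Spec_check_extraction adj edges k (check_extraction adj edges k)

-- ===== LEMMAS AND PROOFS =====

theorem getD_set' (l : List Int) (i : Nat) (x : Int) (j : Nat) :
    (l.set i x).getD j 0 = if i = j ∧ i < l.length then x else l.getD j 0 := by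
  simp only [List.getD_eq_getElem?_getD, List.getElem?_set]
  split_ifs with h1 h2 <;> simp_all <;> omega

theorem getD_setB (l : List Bool) (i : Nat) (x : Bool) (j : Nat) :
    (l.set i x).getD j false = if i = j ∧ i < l.length then x else l.getD j false := by
  simp only [List.getD_eq_getElem?_getD, List.getElem?_set]
  split_ifs with h1 h2 <;> simp_all <;> omega

theorem combos_mem {l : List Nat} {j : Nat} {s : List Nat} (h : s ∈ pvCombos l j) :
    s.Sublist l ∧ s.length = j := by
  induction l generalizing j s with
  | nil =>
    cases j with
    | zero => simp [pvCombos] at h; simp [h]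
    | succ j => simp [pvCombos] at h
  | cons x xs ih =>
    cases j with
    | zero => simp [pvCombos] at h; simp [h]
    | succ j =>
      simp only [pvCombos, List.mem_append, List.mem_map] at h
      rcases h with ⟨t, ht, rfl⟩ | h
      · obtain ⟨hsub, hlen⟩ := ih ht
        exact ⟨List.Sublist.cons₂ x hsub, by simp [hlen]⟩
      · obtain ⟨hsub, hlen⟩ := ih h
        exact ⟨hsub.cons x, hlen⟩

theorem combos_nil {l : List Nat} {j : Nat} (h : l.length < j) : pvCombos l j = [] := by
  induction l generalizing j with
  | nil => cases j with | zero => simp at h | succ j => rfl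
  | cons x xs ih =>
    cases j with
    | zero => simp at h
    | succ j =>
      simp at h
      simp [pvCombos, ih (by omega), ih (by omega : xs.length < j + 1)]

theorem pvWrap_lt {n : Nat} {u : Int} (h1 : -(n : Int) ≤ u) (h2 : u < (n : Int)) :
    pvWrap n u < n := by
  unfold pvWrap; split <;> omega

theorem pvWrap_natCast {n c : Nat} (h : c < n) : pvWrap n (c : Int) = c := by
  unfold pvWrap; split <;> omega

theorem row_mem (adj : List (List Int)) {i : Nat} (h : i < adj.length) :
    adj.getD i [] ∈ adj := by
  rw [List.getD_eq_getElem _ _ h]; exact List.getElem_mem h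

theorem row_range {adj : List (List Int)} (hr : pvInRange adj) {i : Nat} (h : i < adj.length) :
    ∀ w ∈ adj.getD i [], -(adj.length : Int) ≤ w ∧ w < (adj.length : Int) :=
  hr _ (row_mem adj h)

theorem len_foldl_set1 (vs : List Nat) : ∀ c : List Int,
    (vs.foldl (fun c v => c.set v 1) c).length = c.length := by
  induction vs with
  | nil => intro c; rfl
  | cons v vs ih => intro c; simp [List.foldl_cons, ih, List.length_set]

theorem getD_foldl_set1 (vs : List Nat) : ∀ (c : List Int) (v : Nat), (∀ u ∈ vs, u < c.length) →
    (vs.foldl (fun c v => c.set v 1) c).getD v 0 = if v ∈ vs then 1 else c.getD v 0 := by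
  induction vs with
  | nil => intro c v _; simp
  | cons u us ih =>
    intro c v hlt
    rw [List.foldl_cons, ih _ _ (fun x hx => by rw [List.length_set]; exact hlt x (by simp [hx]))]
    rw [getD_set']
    by_cases hm : v ∈ us
    · simp [hm]
    · by_cases he : u = v
      · subst he
        rw [if_neg hm, if_pos ⟨rfl, hlt u (by simp)⟩, if_pos (by simp)]
      · rw [if_neg hm, if_neg (by tauto), if_neg (by simp [hm]; tauto)]

theorem sum_range_map (f : Nat → Int) (n : Nat) :
    ((List.range n).map f).sum = ∑ i ∈ Finset.range n, f i := by
  induction n with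
  | zero => simp
  | succ m ih => rw [List.range_succ, Finset.sum_range_succ]; simp [ih]

theorem list_sum_getD (l : List Int) : l.sum = ∑ i ∈ Finset.range l.length, l.getD i 0 := by
  have h : (List.range l.length).map (fun i => l.getD i 0) = l := by
    apply List.ext_getElem (by simp)
    intro i h1 h2
    simp [List.getD_eq_getElem?_getD, List.getElem?_eq_getElem h2]
  calc l.sum = ((List.range l.length).map (fun i => l.getD i 0)).sum := by rw [h]
    _ = _ := sum_range_map _ _

theorem card_filter_mem {n : Nat} {chosen : List Nat} (hnd : chosen.Nodup)
    (hlt : ∀ v ∈ chosen, v < n) :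
    ((Finset.range n).filter (fun v => v ∈ chosen)).card = chosen.length := by
  rw [← List.toFinset_card_of_nodup hnd]
  congr 1
  ext v
  simp only [Finset.mem_filter, Finset.mem_range, List.mem_toFinset]
  exact ⟨fun h => h.2, fun h => ⟨hlt v h, h⟩⟩

theorem init_fold (config : List Int) (l : List Nat) : ∀ (d : List Int) (q : List Int),
    (l.foldl (fun (p : List Int × List Int) v =>
        if config.getD v 0 = 1 then (p.1.set v 0, p.2 ++ [(v : Int)]) else p) (d, q)).1.length
        = d.length ∧
    (l.foldl (fun (p : List Int × List Int) v =>
        if config.getD v 0 = 1 then (p.1.set v 0, p.2 ++ [(v : Int)]) else p) (d, q)).2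
        = q ++ (l.filter (fun v => config.getD v 0 = 1)).map (fun v => Int.ofNat v) ∧
    ∀ v : Nat,
    (l.foldl (fun (p : List Int × List Int) v =>
        if config.getD v 0 = 1 then (p.1.set v 0, p.2 ++ [(v : Int)]) else p) (d, q)).1.getD v 0
        = if v ∈ l ∧ config.getD v 0 = 1 ∧ v < d.length then 0 else d.getD v 0 := by
  induction l with
  | nil => intro d q; refine ⟨rfl, by simp, fun v => by simp⟩
  | cons x xs ih =>
    intro d q
    rw [List.foldl_cons]
    by_cases hx : config.getD x 0 = 1
    · rw [if_pos hx]
      obtain ⟨h1, h2, h3⟩ := ih (d.set x 0) (q ++ [(x : Int)])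
      refine ⟨by rw [h1, List.length_set], ?_, ?_⟩
      · rw [h2, List.filter_cons_of_pos (by simp only [decide_eq_true_eq]; exact hx), List.map_cons, List.append_assoc]
        rfl
      · intro v
        rw [h3 v, List.length_set, getD_set']
        by_cases hm : v ∈ xs ∧ config.getD v 0 = 1 ∧ v < d.length
        · rw [if_pos hm, if_pos ⟨List.mem_cons_of_mem _ hm.1, hm.2⟩]
        · rw [if_neg hm]
          by_cases hxv : x = v
          · subst hxv
            by_cases hvl : x < d.length
            · rw [if_pos ⟨rfl, hvl⟩, if_pos ⟨List.mem_cons_self, hx, hvl⟩]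
            · rw [if_neg (by tauto), if_neg (by tauto)]
          · rw [if_neg (by tauto), if_neg (by rintro ⟨h | h, hh⟩ <;> tauto)]
    · rw [if_neg hx]
      obtain ⟨h1, h2, h3⟩ := ih d q
      refine ⟨h1, ?_, ?_⟩
      · rw [h2, List.filter_cons_of_neg (by simp only [decide_eq_true_eq]; exact hx)]
      · intro v
        rw [h3 v]
        by_cases hm : v ∈ xs ∧ config.getD v 0 = 1 ∧ v < d.length
        · rw [if_pos hm, if_pos ⟨List.mem_cons_of_mem _ hm.1, hm.2⟩]
        · rw [if_neg hm]
          by_cases hxv : x = v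
          · subst hxv; rw [if_neg (by tauto)]
          · rw [if_neg (by rintro ⟨h | h, hh⟩ <;> tauto)]

theorem pvBfsLoop_nil (adj : List (List Int)) (fuel : Nat) (d : List Int) :
    pvBfsLoop adj fuel d [] = d := by cases fuel <;> rfl

theorem pvBfsLoop_cons (adj : List (List Int)) (fuel : Nat) (d : List Int) (u : Int)
    (rest : List Int) :
    pvBfsLoop adj (fuel + 1) d (u :: rest)
      = pvBfsLoop adj fuel (pvBfsStep adj u (d, rest)).1 (pvBfsStep adj u (d, rest)).2 := rfl

theorem bfs_fold_id (adj : List (List Int)) (u : Int) : ∀ (ws : List Int) (d q : List Int),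
    (∀ w ∈ ws, pvDget d w ≠ -1) →
    ws.foldl (fun p w => if pvDget p.1 w = -1 then (pvDset p.1 w (pvDget p.1 u + 1), p.2 ++ [w]) else p) (d, q)
      = (d, q) := by
  intro ws
  induction ws with
  | nil => intro d q _; rfl
  | cons w0 ws ih =>
    intro d q h
    rw [List.foldl_cons, if_neg (h w0 (by simp))]
    exact ih d q (fun w hw => h w (by simp [hw]))

theorem bfs_drain (adj : List (List Int)) (hr : pvInRange adj) : ∀ (ts : List Int) (fuel : Nat) (d : List Int),
    d.length = adj.length →
    (∀ v < adj.length, d.getD v 0 ≠ -1) →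
    (∀ t ∈ ts, -(adj.length : Int) ≤ t ∧ t < (adj.length : Int)) →
    ts.length ≤ fuel →
    pvBfsLoop adj fuel d ts = d := by
  intro ts
  induction ts with
  | nil => intro fuel d _ _ _ _; exact pvBfsLoop_nil adj fuel d
  | cons t ts ih =>
    intro fuel d hd hno hts hfuel
    cases fuel with
    | zero => simp at hfuel
    | succ f =>
      rw [pvBfsLoop_cons]
      have htl : pvWrap adj.length t < adj.length :=
        pvWrap_lt (hts t (by simp)).1 (hts t (by simp)).2
      have hstep : pvBfsStep adj t (d, ts) = (d, ts) := by
        unfold pvBfsStep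
        apply bfs_fold_id adj t
        intro w hw
        have := row_range hr htl w hw
        unfold pvDget
        rw [hd]
        exact hno _ (pvWrap_lt this.1 this.2)
      rw [hstep]
      exact ih f d hd hno (fun x hx => hts x (by simp [hx])) (by simpa using hfuel)

theorem bfs_step_center (adj : List (List Int)) (u : Int) :
    ∀ (ws : List Int) (d q : List Int),
    d.length = adj.length →
    (∀ w ∈ ws, -(adj.length : Int) ≤ w ∧ w < (adj.length : Int)) →
    d.getD (pvWrap adj.length u) 0 = 0 →
    ∃ d' app,
      ws.foldl (fun p w => if pvDget p.1 w = -1 then (pvDset p.1 w (pvDget p.1 u + 1), p.2 ++ [w]) else p) (d, q)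
        = (d', q ++ app) ∧
      d'.length = adj.length ∧
      (∀ t ∈ app, t ∈ ws) ∧
      app.length ≤ ws.length ∧
      (∀ v : Nat, d'.getD v 0
        = if d.getD v 0 = -1 ∧ ∃ w ∈ ws, pvWrap adj.length w = v then 1 else d.getD v 0) := by
  intro ws
  induction ws with
  | nil =>
    intro d q hd _ _
    exact ⟨d, [], by simp, hd, by simp, by simp, fun v => by simp⟩
  | cons w0 ws ih =>
    intro d q hd hws hc
    have hw0 := hws w0 (by simp)
    have hw0l : pvWrap adj.length w0 < adj.length := pvWrap_lt hw0.1 hw0.2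
    rw [List.foldl_cons]
    by_cases h0 : pvDget d w0 = -1
    · rw [if_pos h0]
      have h0' : d.getD (pvWrap adj.length w0) 0 = -1 := by unfold pvDget at h0; rwa [hd] at h0
      have hne : pvWrap adj.length w0 ≠ pvWrap adj.length u := by
        intro he; rw [he, hc] at h0'; exact absurd h0' (by norm_num)
      have hval : pvDget d u + 1 = 1 := by unfold pvDget; rw [hd, hc]; norm_num
      have hd1 : pvDset d w0 (pvDget d u + 1) = d.set (pvWrap adj.length w0) 1 := by
        unfold pvDset; rw [hd, hval]
      rw [hd1]
      have hd1len : (d.set (pvWrap adj.length w0) 1).length = adj.length := by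
        rw [List.length_set]; exact hd
      have hd1c : (d.set (pvWrap adj.length w0) 1).getD (pvWrap adj.length u) 0 = 0 := by
        rw [getD_set', if_neg (by tauto)]; exact hc
      obtain ⟨d', app, heq, hlen, happ, hal, hdesc⟩ :=
        ih (d.set (pvWrap adj.length w0) 1) (q ++ [w0]) hd1len
          (fun w hw => hws w (by simp [hw])) hd1c
      refine ⟨d', w0 :: app, ?_, hlen, ?_, by simp; omega, ?_⟩
      · rw [heq, List.append_assoc]; rfl
      · intro t ht
        rcases List.mem_cons.mp ht with rfl | ht
        · simp
        · simp [happ t ht]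
      · intro v
        by_cases hv : pvWrap adj.length w0 = v
        · have hsetv : (d.set (pvWrap adj.length w0) 1).getD v 0 = 1 := by
            rw [getD_set', if_pos ⟨hv, hd.symm ▸ hw0l⟩]
          rw [hdesc v, hsetv]
          rw [if_neg (fun h => by norm_num at h)]
          rw [if_pos ⟨hv ▸ h0', ⟨w0, by simp, hv⟩⟩]
        · have hsetv : (d.set (pvWrap adj.length w0) 1).getD v 0 = d.getD v 0 := by
            rw [getD_set', if_neg (by tauto)]
          rw [hdesc v, hsetv]
          refine if_congr ?_ rfl rfl
          constructor
          · rintro ⟨h1, w, hw1, hw2⟩; exact ⟨h1, w, by simp [hw1], hw2⟩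
          · rintro ⟨h1, w, hw1, hw2⟩
            rcases List.mem_cons.mp hw1 with rfl | hw1
            · exact absurd hw2 hv
            · exact ⟨h1, w, hw1, hw2⟩
    · rw [if_neg h0]
      have h0' : d.getD (pvWrap adj.length w0) 0 ≠ -1 := by unfold pvDget at h0; rwa [hd] at h0
      obtain ⟨d', app, heq, hlen, happ, hal, hdesc⟩ := ih d q hd (fun w hw => hws w (by simp [hw])) hc
      refine ⟨d', app, heq, hlen, fun t ht => by simp [happ t ht], by simp; omega, ?_⟩
      intro v
      rw [hdesc v]
      refine if_congr ?_ rfl rfl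
      constructor
      · rintro ⟨h1, w, hw1, hw2⟩; exact ⟨h1, w, by simp [hw1], hw2⟩
      · rintro ⟨h1, w, hw1, hw2⟩
        rcases List.mem_cons.mp hw1 with rfl | hw1
        · exact absurd h1 (hw2 ▸ h0')
        · exact ⟨h1, w, hw1, hw2⟩

theorem bfs_phase (adj : List (List Int)) (hr : pvInRange adj) (chosen : List Nat)
    (hch : ∀ v ∈ chosen, v < adj.length) :
    ∀ (cs : List Nat), (∀ c ∈ cs, c < adj.length ∧ c ∈ chosen) →
    ∀ (fuel : Nat) (ts d : List Int),
    d.length = adj.length →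
    (∀ t ∈ ts, -(adj.length : Int) ≤ t ∧ t < (adj.length : Int) ∧ d.getD (pvWrap adj.length t) 0 ≠ -1) →
    (∀ v < adj.length, (d.getD v 0 = 0 ↔ v ∈ chosen)) →
    (∀ v < adj.length, d.getD v 0 = 0 ∨ d.getD v 0 = 1 ∨ d.getD v 0 = -1) →
    (∀ v < adj.length, d.getD v 0 = -1 → ∃ c ∈ cs, ∃ w ∈ adj.getD c [], pvWrap adj.length w = v) →
    cs.length + ts.length + ((cs.map (fun c => (adj.getD c []).length)).sum) ≤ fuel →
    (pvBfsLoop adj fuel d (cs.map (fun c => Int.ofNat c) ++ ts)).length = adj.length ∧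
    ∀ v : Nat, (pvBfsLoop adj fuel d (cs.map (fun c => Int.ofNat c) ++ ts)).getD v 0
      = if v ∈ chosen then 0 else if v < adj.length then 1 else 0 := by
  intro cs
  induction cs with
  | nil =>
    intro _ fuel ts d hd hts hd0 hd1 hrem hfuel
    have hno : ∀ v < adj.length, d.getD v 0 ≠ -1 := by
      intro v hv hminus
      obtain ⟨c, hc, -⟩ := hrem v hv hminus
      exact absurd hc (List.not_mem_nil)
    rw [List.map_nil, List.nil_append,
      bfs_drain adj hr ts fuel d hd hno (fun t ht => ⟨(hts t ht).1, (hts t ht).2.1⟩) (by simpa using hfuel)]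
    refine ⟨hd, fun v => ?_⟩
    by_cases hv : v < adj.length
    · by_cases hm : v ∈ chosen
      · rw [if_pos hm]; exact (hd0 v hv).mpr hm
      · rw [if_neg hm, if_pos hv]
        rcases hd1 v hv with h | h | h
        · exact absurd ((hd0 v hv).mp h) hm
        · exact h
        · exact absurd h (hno v hv)
    · rw [if_neg (fun hm => hv (hch v hm)), if_neg hv]
      rw [List.getD_eq_default _ _ (by omega)]
  | cons c cs ih =>
    intro hcs fuel ts d hd hts hd0 hd1 hrem hfuel
    obtain ⟨hcl, hcm⟩ := hcs c (by simp)
    cases fuel with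
    | zero => simp at hfuel
    | succ f =>
      rw [List.map_cons, List.cons_append, pvBfsLoop_cons]
      have hwc : pvWrap adj.length (Int.ofNat c) = c := pvWrap_natCast hcl
      have hstep : pvBfsStep adj (Int.ofNat c) (d, cs.map (fun c => Int.ofNat c) ++ ts)
          = (adj.getD c []).foldl
            (fun p w => if pvDget p.1 w = -1 then (pvDset p.1 w (pvDget p.1 (Int.ofNat c) + 1), p.2 ++ [w]) else p)
            (d, cs.map (fun c => Int.ofNat c) ++ ts) := by
        unfold pvBfsStep; rw [hwc]
      obtain ⟨d', app, heq, hlen, happ, hal, hdesc⟩ :=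
        bfs_step_center adj (Int.ofNat c) (adj.getD c []) d (cs.map (fun c => Int.ofNat c) ++ ts)
          hd (row_range hr hcl) (by rw [hwc]; exact (hd0 c hcl).mpr hcm)
      rw [hstep, heq]
      have hq : (cs.map (fun c => Int.ofNat c) ++ ts) ++ app
          = cs.map (fun c => Int.ofNat c) ++ (ts ++ app) := List.append_assoc _ _ _
      rw [hq]
      have happrange : ∀ t ∈ app, -(adj.length : Int) ≤ t ∧ t < (adj.length : Int) :=
        fun t ht => row_range hr hcl t (happ t ht)
      apply ih (fun x hx => hcs x (by simp [hx])) f (ts ++ app) d' hlen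
      · intro t ht
        rcases List.mem_append.mp ht with ht | ht
        · obtain ⟨h1, h2, h3⟩ := hts t ht
          refine ⟨h1, h2, ?_⟩
          rw [hdesc]
          split_ifs with hif
          · norm_num
          · exact h3
        · obtain ⟨h1, h2⟩ := happrange t ht
          refine ⟨h1, h2, ?_⟩
          rw [hdesc]
          split_ifs with hif
          · norm_num
          · exact fun hh => hif ⟨hh, t, happ t ht, rfl⟩
      · intro v hv
        rw [hdesc]
        split_ifs with hif
        · constructor
          · intro h; norm_num at h
          · intro hm
            exact absurd ((hd0 v hv).mpr hm) (by rw [hif.1]; norm_num)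
        · exact hd0 v hv
      · intro v hv
        rw [hdesc]
        split_ifs with hif
        · right; left; rfl
        · exact hd1 v hv
      · intro v hv hminus
        rw [hdesc v] at hminus
        split_ifs at hminus with hif
        obtain ⟨c0, hc0, w, hw, hww⟩ := hrem v hv hminus
        rcases List.mem_cons.mp hc0 with rfl | hc0
        · exact absurd ⟨hminus, w, hw, hww⟩ hif
        · exact ⟨c0, hc0, w, hw, hww⟩
      · rw [List.length_append]
        simp only [List.length_cons, List.map_cons, List.sum_cons] at hfuel
        omega

theorem bfs_step_inv (adj : List (List Int)) (hr : pvInRange adj) (chosen : List Nat) (u : Int)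
    (hu : pvWrap adj.length u < adj.length) :
    ∀ (ws : List Int) (d q : List Int),
    d.length = adj.length →
    (∀ w ∈ ws, w ∈ adj.getD (pvWrap adj.length u) []) →
    0 ≤ d.getD (pvWrap adj.length u) 0 →
    (∀ v < adj.length, d.getD v 0 = -1 ∨ (d.getD v 0 = 0 ∧ v ∈ chosen) ∨
      (1 ≤ d.getD v 0 ∧ (d.getD v 0 = 1 → ∃ c ∈ chosen, ∃ w ∈ adj.getD c [], pvWrap adj.length w = v))) →
    ∃ d' app,
      ws.foldl (fun p w => if pvDget p.1 w = -1 then (pvDset p.1 w (pvDget p.1 u + 1), p.2 ++ [w]) else p) (d, q)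
        = (d', q ++ app) ∧
      d'.length = adj.length ∧
      (∀ v < adj.length, 0 ≤ d.getD v 0 → d'.getD v 0 = d.getD v 0) ∧
      (∀ v < adj.length, d'.getD v 0 = -1 ∨ (d'.getD v 0 = 0 ∧ v ∈ chosen) ∨
        (1 ≤ d'.getD v 0 ∧ (d'.getD v 0 = 1 → ∃ c ∈ chosen, ∃ w ∈ adj.getD c [], pvWrap adj.length w = v))) ∧
      (∀ t ∈ app, -(adj.length : Int) ≤ t ∧ t < (adj.length : Int) ∧ 0 ≤ d'.getD (pvWrap adj.length t) 0) := by
  intro ws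
  induction ws with
  | nil =>
    intro d q hd _ _ hP
    exact ⟨d, [], by simp, hd, fun v _ _ => rfl, hP, by simp⟩
  | cons w0 ws ih =>
    intro d q hd hws hc hP
    have hw0r : -(adj.length : Int) ≤ w0 ∧ w0 < (adj.length : Int) :=
      row_range hr hu w0 (hws w0 (by simp))
    have hw0l : pvWrap adj.length w0 < adj.length := pvWrap_lt hw0r.1 hw0r.2
    rw [List.foldl_cons]
    by_cases h0 : pvDget d w0 = -1
    · rw [if_pos h0]
      have h0' : d.getD (pvWrap adj.length w0) 0 = -1 := by unfold pvDget at h0; rwa [hd] at h0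
      have hval : pvDget d u + 1 = d.getD (pvWrap adj.length u) 0 + 1 := by unfold pvDget; rw [hd]
      have hne : pvWrap adj.length w0 ≠ pvWrap adj.length u := by
        intro he; rw [he] at h0'; omega
      have hd1 : pvDset d w0 (pvDget d u + 1)
          = d.set (pvWrap adj.length w0) (d.getD (pvWrap adj.length u) 0 + 1) := by
        unfold pvDset; rw [hd, hval]
      rw [hd1]
      have hd1len : (d.set (pvWrap adj.length w0) (d.getD (pvWrap adj.length u) 0 + 1)).length
          = adj.length := by rw [List.length_set]; exact hd
      have hd1get : ∀ v : Nat,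
          (d.set (pvWrap adj.length w0) (d.getD (pvWrap adj.length u) 0 + 1)).getD v 0
          = if pvWrap adj.length w0 = v then d.getD (pvWrap adj.length u) 0 + 1
            else d.getD v 0 := by
        intro v
        rw [getD_set']
        by_cases hv : pvWrap adj.length w0 = v
        · rw [if_pos ⟨hv, hd.symm ▸ hw0l⟩, if_pos hv]
        · rw [if_neg (by tauto), if_neg hv]
      have hd1c : (d.set (pvWrap adj.length w0) (d.getD (pvWrap adj.length u) 0 + 1)).getD
          (pvWrap adj.length u) 0 = d.getD (pvWrap adj.length u) 0 := by
        rw [hd1get, if_neg hne]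
      have hP1 : ∀ v < adj.length,
          (d.set (pvWrap adj.length w0) (d.getD (pvWrap adj.length u) 0 + 1)).getD v 0 = -1 ∨
          ((d.set (pvWrap adj.length w0) (d.getD (pvWrap adj.length u) 0 + 1)).getD v 0 = 0 ∧ v ∈ chosen) ∨
          (1 ≤ (d.set (pvWrap adj.length w0) (d.getD (pvWrap adj.length u) 0 + 1)).getD v 0 ∧
            ((d.set (pvWrap adj.length w0) (d.getD (pvWrap adj.length u) 0 + 1)).getD v 0 = 1 →
              ∃ c ∈ chosen, ∃ w ∈ adj.getD c [], pvWrap adj.length w = v)) := by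
        intro v hv
        rw [hd1get]
        by_cases hvv : pvWrap adj.length w0 = v
        · rw [if_pos hvv]
          right; right
          refine ⟨by omega, fun h1 => ?_⟩
          have hc0 : d.getD (pvWrap adj.length u) 0 = 0 := by omega
          rcases hP (pvWrap adj.length u) hu with h | ⟨-, hmem⟩ | ⟨h, -⟩
          · omega
          · exact ⟨pvWrap adj.length u, hmem, w0, hws w0 (by simp), hvv⟩
          · omega
        · rw [if_neg hvv]
          exact hP v hv
      obtain ⟨d', app, heq, hlen, hpres, hP', happ⟩ :=
        ih (d.set (pvWrap adj.length w0) (d.getD (pvWrap adj.length u) 0 + 1)) (q ++ [w0])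
          hd1len (fun w hw => hws w (by simp [hw])) (by rw [hd1c]; exact hc) hP1
      refine ⟨d', w0 :: app, ?_, hlen, ?_, hP', ?_⟩
      · rw [heq, List.append_assoc]; rfl
      · intro v hv hnn
        have hvv : pvWrap adj.length w0 ≠ v := by
          intro he; rw [he] at h0'; omega
        rw [hpres v hv (by rw [hd1get, if_neg hvv]; exact hnn), hd1get, if_neg hvv]
      · intro t ht
        rcases List.mem_cons.mp ht with rfl | ht
        · refine ⟨hw0r.1, hw0r.2, ?_⟩
          rw [hpres _ hw0l (by rw [hd1get, if_pos rfl]; omega), hd1get, if_pos rfl]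
          omega
        · exact happ t ht
    · rw [if_neg h0]
      obtain ⟨d', app, heq, hlen, hpres, hP', happ⟩ :=
        ih d q hd (fun w hw => hws w (by simp [hw])) hc hP
      exact ⟨d', app, heq, hlen, hpres, hP', happ⟩

theorem bfs_inv (adj : List (List Int)) (hr : pvInRange adj) (chosen : List Nat) :
    ∀ (fuel : Nat) (d q : List Int),
    d.length = adj.length →
    (∀ t ∈ q, -(adj.length : Int) ≤ t ∧ t < (adj.length : Int) ∧ 0 ≤ d.getD (pvWrap adj.length t) 0) →
    (∀ v < adj.length, d.getD v 0 = -1 ∨ (d.getD v 0 = 0 ∧ v ∈ chosen) ∨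
      (1 ≤ d.getD v 0 ∧ (d.getD v 0 = 1 → ∃ c ∈ chosen, ∃ w ∈ adj.getD c [], pvWrap adj.length w = v))) →
    (pvBfsLoop adj fuel d q).length = adj.length ∧
    (∀ v < adj.length, (pvBfsLoop adj fuel d q).getD v 0 = -1 ∨
      ((pvBfsLoop adj fuel d q).getD v 0 = 0 ∧ v ∈ chosen) ∨
      (1 ≤ (pvBfsLoop adj fuel d q).getD v 0 ∧ ((pvBfsLoop adj fuel d q).getD v 0 = 1 →
        ∃ c ∈ chosen, ∃ w ∈ adj.getD c [], pvWrap adj.length w = v))) := by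
  intro fuel
  induction fuel with
  | zero => intro d q hd _ hP; exact ⟨hd, hP⟩
  | succ f ih =>
    intro d q hd hq hP
    cases q with
    | nil => rw [pvBfsLoop_nil]; exact ⟨hd, hP⟩
    | cons t rest =>
      obtain ⟨ht1, ht2, ht3⟩ := hq t (by simp)
      have htl : pvWrap adj.length t < adj.length := pvWrap_lt ht1 ht2
      rw [pvBfsLoop_cons]
      obtain ⟨d', app, heq, hlen, hpres, hP', happ⟩ :=
        bfs_step_inv adj hr chosen t htl (adj.getD (pvWrap adj.length t) []) d rest hd
          (fun w hw => hw) ht3 hP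
      have hstep : pvBfsStep adj t (d, rest) = (d', rest ++ app) := by
        unfold pvBfsStep; exact heq
      rw [hstep]
      apply ih d' (rest ++ app) hlen ?_ hP'
      intro s hs
      rcases List.mem_append.mp hs with hs | hs
      · obtain ⟨h1, h2, h3⟩ := hq s (by simp [hs])
        exact ⟨h1, h2, by rw [hpres _ (pvWrap_lt h1 h2) h3]; exact h3⟩
      · exact happ s hs

theorem getD_replicate_int (n v : Nat) (x : Int) :
    (List.replicate n x).getD v 0 = if v < n then x else 0 := by
  simp only [List.getD_eq_getElem?_getD, List.getElem?_replicate]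
  split_ifs <;> rfl

theorem rowlen_map (adj : List (List Int)) :
    (List.range adj.length).map (fun c => (adj.getD c []).length) = adj.map List.length := by
  apply List.ext_getElem (by simp)
  intro i h1 h2
  simp only [List.getElem_map, List.getElem_range]
  rw [List.getD_eq_getElem _ _ (by simpa using h2)]

theorem sum_rows_filter_le (adj : List (List Int)) (p : Nat → Bool) :
    (((List.range adj.length).filter p).map (fun c => (adj.getD c []).length)).sum
      ≤ (adj.map List.length).sum := by
  rw [← rowlen_map adj]
  exact ((List.filter_sublist).map _).sum_le_sum (fun _ _ => Nat.zero_le _)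

theorem init_facts (adj : List (List Int)) (chosen : List Nat)
    (hch : ∀ v ∈ chosen, v < adj.length) (config : List Int)
    (hcget : ∀ v : Nat, config.getD v 0 = if v ∈ chosen then 1 else 0) :
    ((List.range adj.length).foldl (fun (p : List Int × List Int) v =>
        if config.getD v 0 = 1 then (p.1.set v 0, p.2 ++ [(v : Int)]) else p)
        (List.replicate adj.length (-1), [])).1.length = adj.length ∧
    ((List.range adj.length).foldl (fun (p : List Int × List Int) v =>
        if config.getD v 0 = 1 then (p.1.set v 0, p.2 ++ [(v : Int)]) else p)
        (List.replicate adj.length (-1), [])).2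
      = ((List.range adj.length).filter (fun v => decide (v ∈ chosen))).map (fun v => Int.ofNat v) ∧
    ∀ v : Nat, ((List.range adj.length).foldl (fun (p : List Int × List Int) v =>
        if config.getD v 0 = 1 then (p.1.set v 0, p.2 ++ [(v : Int)]) else p)
        (List.replicate adj.length (-1), [])).1.getD v 0
      = if v ∈ chosen then 0 else if v < adj.length then -1 else 0 := by
  obtain ⟨i1, i2, i3⟩ :=
    init_fold config (List.range adj.length) (List.replicate adj.length (-1)) []
  refine ⟨by rw [i1]; simp, ?_, ?_⟩
  · rw [i2, List.nil_append]
    congr 1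
    apply List.filter_congr
    intro v _
    rw [decide_eq_decide, hcget v]
    by_cases hm : v ∈ chosen <;> simp [hm]
  · intro v
    rw [i3]
    by_cases hm : v ∈ chosen
    · rw [if_pos ⟨List.mem_range.mpr (hch v hm), by rw [hcget, if_pos hm],
        by rw [List.length_replicate]; exact hch v hm⟩, if_pos hm]
    · rw [if_neg (by rw [hcget, if_neg hm]; rintro ⟨-, h, -⟩; norm_num at h), if_neg hm,
        getD_replicate_int]

theorem C_mem (adj : List (List Int)) (chosen : List Nat) :
    ∀ c ∈ (List.range adj.length).filter (fun v => decide (v ∈ chosen)),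
      c < adj.length ∧ c ∈ chosen := by
  intro c hc
  rw [List.mem_filter, List.mem_range] at hc
  exact ⟨hc.1, of_decide_eq_true hc.2⟩

theorem shortest_cov (adj : List (List Int)) (hr : pvInRange adj) (chosen : List Nat)
    (hch : ∀ v ∈ chosen, v < adj.length) (config : List Int)
    (hcget : ∀ v : Nat, config.getD v 0 = if v ∈ chosen then 1 else 0)
    (hcov : pvCoversAll adj chosen) :
    ∃ ds, pvShortestDistances adj config = some ds ∧ ds.length = adj.length ∧
      ∀ v : Nat, ds.getD v 0 = if v ∈ chosen then 0 else if v < adj.length then 1 else 0 := by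
  obtain ⟨i1, i2, i3⟩ := init_facts adj chosen hch config hcget
  have hphase := bfs_phase adj hr chosen hch
    ((List.range adj.length).filter (fun v => decide (v ∈ chosen))) (C_mem adj chosen)
    (adj.length + (adj.map List.length).sum + 1) []
    _ i1 (by simp)
    (by intro v hv; rw [i3, if_pos hv]
        by_cases hm : v ∈ chosen
        · simp [hm]
        · simp [hm])
    (by intro v hv; rw [i3, if_pos hv]; split_ifs <;> simp)
    (by intro v hv hminus
        rw [i3, if_pos hv] at hminus
        have hm : v ∉ chosen := by intro hm; rw [if_pos hm] at hminus; norm_num at hminus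
        rcases hcov v hv with hvm | ⟨u, hu, w, hw, hww⟩
        · exact absurd hvm hm
        · exact ⟨u, List.mem_filter.mpr ⟨List.mem_range.mpr (hch u hu), decide_eq_true hu⟩,
            w, hw, hww⟩)
    (by have h1 := List.length_filter_le (fun v => decide (v ∈ chosen)) (List.range adj.length)
        have h2 := sum_rows_filter_le adj (fun v => decide (v ∈ chosen))
        simp only [List.length_range] at h1
        simp only [List.length_nil]
        omega)
  rw [List.append_nil] at hphase
  rw [← i2] at hphase
  obtain ⟨hlen, hget⟩ := hphase
  refine ⟨_, ?_, hlen, hget⟩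
  simp only [pvShortestDistances]
  rw [if_neg ?_]
  rw [Bool.not_eq_true, List.any_eq_false]
  intro x hx
  obtain ⟨i, hi, rfl⟩ := List.mem_iff_getElem.mp hx
  rw [← List.getD_eq_getElem _ 0 hi]
  rw [hget i]
  split_ifs <;> simp

theorem shortest_inv_facts (adj : List (List Int)) (hr : pvInRange adj) (chosen : List Nat)
    (hch : ∀ v ∈ chosen, v < adj.length) (config : List Int)
    (hcget : ∀ v : Nat, config.getD v 0 = if v ∈ chosen then 1 else 0) :
    ∀ ds, pvShortestDistances adj config = some ds →
      ds.length = adj.length ∧ ∀ v < adj.length, ds.getD v 0 ≠ -1 ∧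
        ((ds.getD v 0 = 0 ∧ v ∈ chosen) ∨
         (1 ≤ ds.getD v 0 ∧ (ds.getD v 0 = 1 →
            ∃ c ∈ chosen, ∃ w ∈ adj.getD c [], pvWrap adj.length w = v))) := by
  obtain ⟨i1, i2, i3⟩ := init_facts adj chosen hch config hcget
  intro ds hds
  simp only [pvShortestDistances] at hds
  split_ifs at hds with hany
  rw [Option.some_inj] at hds
  rw [Bool.not_eq_true, List.any_eq_false] at hany
  rw [i2] at hds hany
  have hinv := bfs_inv adj hr chosen (adj.length + (adj.map List.length).sum + 1) _
    (((List.range adj.length).filter (fun v => decide (v ∈ chosen))).map (fun v => Int.ofNat v)) i1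
    (by intro t ht
        obtain ⟨c, hc, rfl⟩ := List.mem_map.mp ht
        obtain ⟨hcl, hcm⟩ := C_mem adj chosen c hc
        simp only [Int.ofNat_eq_natCast]
        refine ⟨by omega, by exact_mod_cast hcl, ?_⟩
        rw [pvWrap_natCast hcl, i3, if_pos hcm])
    (by intro v hv
        rw [i3]
        by_cases hm : v ∈ chosen
        · right; left; simp [hm]
        · left; simp [hm, hv])
  rw [hds] at hinv hany
  obtain ⟨hlen, hP⟩ := hinv
  refine ⟨hlen, fun v hv => ?_⟩
  have hne : ds.getD v 0 ≠ -1 := by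
    have hvl : v < ds.length := by omega
    rw [List.getD_eq_getElem _ 0 hvl]
    intro hcon
    exact (by simpa [hcon] using hany ds[v] (List.getElem_mem hvl))
  rcases hP v hv with h | h | h
  · exact absurd h hne
  · exact ⟨hne, Or.inl h⟩
  · exact ⟨hne, Or.inr h⟩

theorem feasible_iff_covers (adj : List (List Int)) (k : Int) (chosen : List Nat)
    (hr : pvInRange adj) (hs : chosen.Sublist (List.range adj.length))
    (hk : (chosen.length : Int) = k) :
    (pvIsFeasible adj
        (chosen.foldl (fun c v => c.set v 1) (List.replicate adj.length (0 : Int)))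
        k ((adj.length : Int) - k) = true)
      ↔ pvCoversAll adj chosen := by
  have hch : ∀ v ∈ chosen, v < adj.length := fun v hv => List.mem_range.mp (hs.subset hv)
  have hnd : chosen.Nodup := (List.nodup_range).sublist hs
  have hlenle : chosen.length ≤ adj.length := by simpa using hs.length_le
  have hclen : (chosen.foldl (fun c v => c.set v 1) (List.replicate adj.length (0 : Int))).length
      = adj.length := by rw [len_foldl_set1]; simp
  have hcget : ∀ v : Nat,
      (chosen.foldl (fun c v => c.set v 1) (List.replicate adj.length (0 : Int))).getD v 0
      = if v ∈ chosen then 1 else 0 := by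
    intro v
    rw [getD_foldl_set1 _ _ _ (fun u hu => by simp [hch u hu])]
    by_cases hm : v ∈ chosen
    · rw [if_pos hm, if_pos hm]
    · rw [if_neg hm, if_neg hm, getD_replicate_int]
      split_ifs <;> rfl
  have hcard : ((Finset.range adj.length).filter (fun v => v ∈ chosen)).card
      = chosen.length := card_filter_mem hnd hch
  have hsum : (chosen.foldl (fun c v => c.set v 1) (List.replicate adj.length (0 : Int))).sum
      = (chosen.length : Int) := by
    rw [list_sum_getD, hclen]
    rw [Finset.sum_congr rfl (fun i _ => hcget i)]
    rw [Finset.sum_boole]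
    rw [hcard]
  have hkeq : (chosen.foldl (fun c v => c.set v 1) (List.replicate adj.length (0 : Int))).sum
      = k := by rw [hsum, hk]
  unfold pvIsFeasible
  rw [if_neg (fun h => h hkeq)]
  unfold pvTotalWeightedDistance
  constructor
  · intro hf
    rcases hds : pvShortestDistances adj
        (chosen.foldl (fun c v => c.set v 1) (List.replicate adj.length (0 : Int))) with _ | ds
    · rw [hds] at hf; simp at hf
    · rw [hds] at hf
      obtain ⟨hlen, hP⟩ := shortest_inv_facts adj hr chosen hch _ hcget ds hds
      have hle : ds.sum ≤ (adj.length : Int) - k := by simpa using hf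
      -- sum forcing
      have hgsum : ds.sum = ∑ i ∈ Finset.range adj.length, ds.getD i 0 := by
        rw [list_sum_getD, hlen]
      have hsplit := Finset.sum_filter_add_sum_filter_not (Finset.range adj.length)
        (fun v => v ∈ chosen) (fun i => ds.getD i 0)
      have hApos : ∀ i ∈ (Finset.range adj.length).filter (fun v => v ∈ chosen),
          0 ≤ ds.getD i 0 := by
        intro i hi
        rw [Finset.mem_filter, Finset.mem_range] at hi
        rcases (hP i hi.1).2 with h | h
        · omega
        · omega
      have hB1 : ∀ i ∈ (Finset.range adj.length).filter (fun v => ¬ v ∈ chosen),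
          1 ≤ ds.getD i 0 := by
        intro i hi
        rw [Finset.mem_filter, Finset.mem_range] at hi
        rcases (hP i hi.1).2 with h | h
        · exact absurd h.2 hi.2
        · exact h.1
      have hcardB : (((Finset.range adj.length).filter (fun v => ¬ v ∈ chosen)).card : Int)
          = (adj.length : Int) - (chosen.length : Int) := by
        have := Finset.filter_card_add_filter_neg_card_eq_card
          (s := Finset.range adj.length) (fun v => v ∈ chosen)
        rw [hcard] at this
        simp only [Finset.card_range] at this
        omega
      have hforce : ∀ i ∈ (Finset.range adj.length).filter (fun v => ¬ v ∈ chosen),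
          ds.getD i 0 = 1 := by
        have hzero : ∑ i ∈ (Finset.range adj.length).filter (fun v => ¬ v ∈ chosen),
            (ds.getD i 0 - 1) = 0 := by
          have hub : ∑ i ∈ (Finset.range adj.length).filter (fun v => ¬ v ∈ chosen),
              (ds.getD i 0 - 1)
              = (∑ i ∈ (Finset.range adj.length).filter (fun v => ¬ v ∈ chosen), ds.getD i 0)
                - ((Finset.range adj.length).filter (fun v => ¬ v ∈ chosen)).card := by
            rw [Finset.sum_sub_distrib]
            simp
          have hA0 : 0 ≤ ∑ i ∈ (Finset.range adj.length).filter (fun v => v ∈ chosen),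
              ds.getD i 0 := Finset.sum_nonneg hApos
          have hlb : 0 ≤ ∑ i ∈ (Finset.range adj.length).filter (fun v => ¬ v ∈ chosen),
              (ds.getD i 0 - 1) :=
            Finset.sum_nonneg (fun i hi => by have := hB1 i hi; omega)
          rw [hgsum, ← hsplit] at hle
          rw [hub]
          rw [hcardB]
          omega
        intro i hi
        have := (Finset.sum_eq_zero_iff_of_nonneg
          (fun i hi => by have := hB1 i hi; omega)).mp hzero i hi
        omega
      intro v hv
      by_cases hm : v ∈ chosen
      · exact Or.inl hm
      · have h1 : ds.getD v 0 = 1 := hforce v (by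
          rw [Finset.mem_filter, Finset.mem_range]; exact ⟨hv, hm⟩)
        rcases (hP v hv).2 with h | h
        · exact absurd h.2 hm
        · exact Or.inr (h.2 h1)
  · intro hcov
    obtain ⟨ds, hds, hlen, hget⟩ := shortest_cov adj hr chosen hch _ hcget hcov
    have hsumds : ds.sum = (adj.length : Int) - (chosen.length : Int) := by
      rw [list_sum_getD, hlen]
      have h1 : ∀ i ∈ Finset.range adj.length,
          ds.getD i 0 = 1 - (if i ∈ chosen then (1 : Int) else 0) := by
        intro i hi
        rw [hget i]
        by_cases hm : i ∈ chosen
        · rw [if_pos hm, if_pos hm]; norm_num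
        · rw [if_neg hm, if_neg hm, if_pos (Finset.mem_range.mp hi)]; norm_num
      rw [Finset.sum_congr rfl h1, Finset.sum_sub_distrib, Finset.sum_boole, hcard,
        Finset.sum_const, Finset.card_range, nsmul_eq_mul, mul_one]
    rw [hds]
    show decide (ds.sum ≤ (adj.length : Int) - k) = true
    rw [decide_eq_true_eq, hsumds, hk]

theorem mark_inner_len (n : Nat) (ws : List Int) : ∀ c : List Bool,
    (ws.foldl (fun c2 w => c2.set (pvWrap n w) true) c).length = c.length := by
  induction ws with
  | nil => intro c; rfl
  | cons w ws ih => intro c; simp [List.foldl_cons, ih, List.length_set]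

theorem mark_inner_getD (n : Nat) (ws : List Int) : ∀ (c : List Bool), c.length = n → ∀ v : Nat,
    ((ws.foldl (fun c2 w => c2.set (pvWrap n w) true) c).getD v false = true ↔
      (c.getD v false = true ∨ ∃ w ∈ ws, pvWrap n w = v ∧ v < n)) := by
  induction ws with
  | nil => intro c hc v; simp
  | cons w ws ih =>
    intro c hc v
    rw [List.foldl_cons, ih _ (by simp [hc])]
    rw [getD_setB, hc]
    by_cases h1 : pvWrap n w = v ∧ v < n
    · simp only [List.mem_cons]
      constructor
      · intro _; right; exact ⟨w, Or.inl rfl, h1⟩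
      · intro _; rw [if_pos ⟨h1.1, h1.1 ▸ h1.2⟩]; simp
    · have : ¬ (pvWrap n w = v ∧ pvWrap n w < n) := by
        intro ⟨he, hl⟩; exact h1 ⟨he, he ▸ hl⟩
      rw [if_neg this]
      simp only [List.mem_cons]
      constructor
      · rintro (hc' | ⟨w', hw', hp⟩)
        · exact Or.inl hc'
        · exact Or.inr ⟨w', Or.inr hw', hp⟩
      · rintro (hc' | ⟨w', hw' | hw', hp⟩)
        · exact Or.inl hc'
        · exact absurd hp (hw' ▸ h1)
        · exact Or.inr ⟨w', hw', hp⟩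

theorem mark_outer_len (adj : List (List Int)) (us : List Nat) : ∀ c : List Bool,
    (us.foldl (fun c u => (adj.getD u []).foldl
        (fun c2 w => c2.set (pvWrap adj.length w) true) (c.set u true)) c).length = c.length := by
  induction us with
  | nil => intro c; rfl
  | cons u us ih =>
    intro c
    simp only [List.foldl_cons]
    rw [ih, mark_inner_len, List.length_set]

theorem mark_outer_getD (adj : List (List Int)) (us : List Nat) : ∀ (c : List Bool),
    c.length = adj.length → ∀ v : Nat,
    ((us.foldl (fun c u => (adj.getD u []).foldl
        (fun c2 w => c2.set (pvWrap adj.length w) true) (c.set u true)) c).getD v false = true ↔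
      (c.getD v false = true ∨ (v < adj.length ∧
        (v ∈ us ∨ ∃ u ∈ us, ∃ w ∈ adj.getD u [], pvWrap adj.length w = v)))) := by
  induction us with
  | nil => intro c hc v; simp
  | cons u us ih =>
    intro c hc v
    simp only [List.foldl_cons]
    rw [ih _ (by rw [mark_inner_len, List.length_set]; exact hc)]
    rw [mark_inner_getD _ _ _ (by rw [List.length_set]; exact hc)]
    rw [getD_setB, hc]
    simp only [List.mem_cons]
    constructor
    · rintro ((h | hc') | hlt)
      · split_ifs at h with hif
        · exact Or.inr ⟨hif.1 ▸ hif.2, Or.inl (Or.inl hif.1.symm)⟩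
        · exact Or.inl h
      · rcases hc' with ⟨w, hw, he, hv⟩
        exact Or.inr ⟨hv, Or.inr ⟨u, Or.inl rfl, w, hw, he⟩⟩
      · rcases hlt with ⟨hv, hm | ⟨u', hu', hw⟩⟩
        · exact Or.inr ⟨hv, Or.inl (Or.inr hm)⟩
        · exact Or.inr ⟨hv, Or.inr ⟨u', Or.inr hu', hw⟩⟩
    · rintro (hc' | ⟨hv, (rfl | hm) | ⟨u', hu' | hu', w, hw, he⟩⟩)
      · left; left
        split_ifs with hif
        · rfl
        · exact hc'
      · left; left; rw [if_pos ⟨rfl, hv⟩]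
      · exact Or.inr ⟨hv, Or.inl hm⟩
      · subst hu'; left; right; exact ⟨w, hw, he, hv⟩
      · exact Or.inr ⟨hv, Or.inr ⟨u', hu', w, hw, he⟩⟩


theorem all_id_iff (l : List Bool) :
    (l.all (fun b => b) = true) ↔ ∀ i < l.length, l.getD i false = true := by
  rw [List.all_eq_true]
  constructor
  · intro h i hi
    rw [List.getD_eq_getElem _ _ hi]
    exact h _ (List.getElem_mem hi)
  · intro h b hb
    obtain ⟨i, hi, rfl⟩ := List.mem_iff_getElem.mp hb
    rw [← List.getD_eq_getElem _ false hi]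
    exact h i hi

theorem covered_iff_covers (adj : List (List Int)) (chosen : List Nat) :
    ((chosen.foldl
        (fun c u => (adj.getD u []).foldl (fun c2 w => c2.set (pvWrap adj.length w) true) (c.set u true))
        (List.replicate adj.length false)).all (fun b => b) = true)
      ↔ pvCoversAll adj chosen := by
  have hlen : (chosen.foldl (fun c u => (adj.getD u []).foldl
      (fun c2 w => c2.set (pvWrap adj.length w) true) (c.set u true))
      (List.replicate adj.length false)).length = adj.length := by
    rw [mark_outer_len]; simp
  rw [all_id_iff, hlen]
  have hrep : ∀ v : Nat, (List.replicate adj.length false).getD v false = false := by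
    intro v
    simp [List.getD_eq_getElem?_getD, List.getElem?_replicate]
    split_ifs <;> rfl
  constructor
  · intro h v hv
    rcases (mark_outer_getD adj chosen (List.replicate adj.length false) (by simp) v).mp
        (h v hv) with hc | ⟨_, hcov⟩
    · rw [hrep v] at hc; exact absurd hc (by simp)
    · exact hcov
  · intro h v hv
    exact (mark_outer_getD adj chosen (List.replicate adj.length false) (by simp) v).mpr
      (Or.inr ⟨hv, h v hv⟩)

theorem foldl_count_congr {α : Type} (l : List α) (p q : α → Bool)
    (h : ∀ s ∈ l, p s = q s) :
    ∀ a : Int, l.foldl (fun c s => if p s then c + 1 else c) a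
      = l.foldl (fun c s => if q s then c + 1 else c) a := by
  induction l with
  | nil => intro a; rfl
  | cons x xs ih =>
    intro a
    simp only [List.foldl_cons, h x (by simp)]
    exact ih (fun s hs => h s (by simp [hs])) _

theorem k0_eq (adj : List (List Int)) :
    pvIsFeasible adj (List.replicate adj.length (0 : Int)) 0 ((adj.length : Int) - 0)
      = (List.replicate adj.length false).all (fun b => b) := by
  have hnot : ∀ v : Nat, ¬((List.replicate adj.length (0 : Int)).getD v 0 = 1) := by
    intro v; rw [getD_replicate_int]; split_ifs <;> norm_num
  have hinit : ∀ (l : List Nat),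
      (l.foldl (fun (p : List Int × List Int) v =>
        if (List.replicate adj.length (0 : Int)).getD v 0 = 1 then (p.1.set v 0, p.2 ++ [(v : Int)]) else p)
        (List.replicate adj.length (-1), [])) = (List.replicate adj.length (-1), []) := by
    intro l
    induction l with
    | nil => rfl
    | cons x xs ih =>
      rw [List.foldl_cons, if_neg (hnot x)]
      exact ih
  unfold pvIsFeasible
  rw [if_neg (by simp)]
  unfold pvTotalWeightedDistance
  simp only [pvShortestDistances]
  rw [hinit (List.range adj.length), pvBfsLoop_nil]
  cases hn : adj.length with
  | zero => simp
  | succ m => simp [List.replicate_succ]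

-- ===== VERDICT (by name: the statement is the Claim_ definition above) =====
theorem check_extraction_spec : Claim_equal_check_extraction := by
  intro adj edges k _ hpre
  obtain ⟨hk0, hk1, -⟩ := hpre
  unfold Spec_check_extraction
  simp only [check_extraction, check_extraction_alt]
  refine foldl_count_congr _ _ _ ?_ 0
  intro s hs
  obtain ⟨hsub, hlen⟩ := combos_mem hs
  by_cases hr : pvInRange adj
  · have hk : (s.length : Int) = k := by rw [hlen]; omega
    have h1 := feasible_iff_covers adj k s hr hsub hk
    have h2 := covered_iff_covers adj s
    exact Bool.eq_iff_iff.mpr (h1.trans h2.symm)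
  · have hkn : k = 0 ∨ (adj.length : Int) < k := by
      by_contra hcon
      rcases not_or.mp hcon with ⟨h1, h2⟩
      exact hr (hk1 (by omega) (by omega))
    rcases hkn with rfl | hbig
    · have hs0 : s = [] := by
        rw [show (0 : Int).toNat = 0 from rfl] at hs
        simp only [pvCombos] at hs
        simpa using hs
      subst hs0
      simp only [List.foldl_nil]
      exact k0_eq adj
    · have hlt : (List.range adj.length).length < k.toNat := by simp; omega
      rw [combos_nil hlt] at hs
      exact absurd hs (List.not_mem_nil)
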